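-- pv_equiv track=rewrite | github.com/mKopac/ZP_Kopac | PythonFormatter.py | normalize_sibling_indentation
-- ===== SOURCE A (Python) =====
-- def count_leading_spaces(line):
--     """Return the number of leading spaces in the given line."""
--     return len(line) - len(line.lstrip(' '))
--
-- def normalize_sibling_indentation(lines, tolerance=2):
--     """
--     Normalizes the indentation of sibling lines within a block.
--
--     For any block header (a line ending with a colon) that does NOT start with "def ",
--     this function finds the first non-empty line (the marker) and then for subsequent lines in that block
--     (i.e. lines with indent greater than the header) until a line with indent <= parent's indent is encountered,
--     if a line's indent is within 'tolerance' spaces of the marker, it is set to exactly the marker's indent.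
--
--     Lines that have the same indentation as the parent are not modified.
--     """
--     new_lines = list(lines)
--     i = 0
--     while i < len(new_lines) - 1:
--         if new_lines[i].rstrip().endswith(":") and not new_lines[i].lstrip().startswith("def "):
--             parent_indent = count_leading_spaces(new_lines[i])
--             j = i + 1
--             while j < len(new_lines) and new_lines[j].strip() == "":
--                 j += 1
--             if j < len(new_lines):
--                 marker_indent = count_leading_spaces(new_lines[j])
--                 k = j + 1
--                 while k < len(new_lines):
--                     if new_lines[k].strip() == "":
--                         k += 1
--                         continue
--                     current_indent = count_leading_spaces(new_lines[k])
--                     if current_indent <= parent_indent: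
--                         break
--                     if abs(current_indent - marker_indent) <= tolerance:
--                         new_lines[k] = " " * marker_indent + new_lines[k].lstrip(' ')
--                     k += 1
--             i = k
--         else:
--             i += 1
--     return new_lines
-- ===== SOURCE B (Python) =====
-- def count_leading_spaces(line):
--     """Return the number of leading spaces in the given line."""
--     return len(line) - len(line.lstrip(' '))
--
-- def normalize_sibling_indentation(lines, tolerance=2):
--     """Single monotonic forward pass driven by a small state machine.
--
--     state is None (looking for a block header), ("seek", parent) (header seen,
--     looking for the marker line), or ("block", parent, marker) (inside a block).
--     Each line is emitted exactly once; a non-blank line whose indent falls back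
--     to <= parent ends the block and is itself re-considered as a header.
--     """
--     n = len(lines)
--     out = []
--     state = None
--     for idx, line in enumerate(lines):
--         blank = line.strip() == ""
--         if state is not None and state[0] == "block" and not blank \
--                 and count_leading_spaces(line) <= state[1]:
--             state = None  # block ended; this line may itself start a new block
--         if state is None:
--             if idx < n - 1 and line.rstrip().endswith(":") \
--                     and not line.lstrip().startswith("def "):
--                 state = ("seek", count_leading_spaces(line))
--         elif state[0] == "seek":
--             if not blank:
--                 state = ("block", state[1], count_leading_spaces(line))
--         else:  # inside a block
--             if not blank:
--                 cur = count_leading_spaces(line)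
--                 if abs(cur - state[2]) <= tolerance:
--                     line = " " * state[2] + line.lstrip(' ')
--         out.append(line)
--     return out
-- ===== Notes on version B (the rewrite author's own statement) =====
-- stated objective: alternative
-- what changed: A's nested while-loops with index jumps (outer scan, blank-skip scan, block scan over a mutated copy) are replaced by one monotonic forward pass over the lines driven by a three-state machine (looking-for-header / seeking-marker / inside-block) that emits each line exactly once.
-- outside the precondition, e.g. on normalize_sibling_indentation(['a:', ' b:', '', ''], 2): A returns ['a:', ' b:', '', ''], B returns ['a:', ' b:', '', '']
import Mathlib
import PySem

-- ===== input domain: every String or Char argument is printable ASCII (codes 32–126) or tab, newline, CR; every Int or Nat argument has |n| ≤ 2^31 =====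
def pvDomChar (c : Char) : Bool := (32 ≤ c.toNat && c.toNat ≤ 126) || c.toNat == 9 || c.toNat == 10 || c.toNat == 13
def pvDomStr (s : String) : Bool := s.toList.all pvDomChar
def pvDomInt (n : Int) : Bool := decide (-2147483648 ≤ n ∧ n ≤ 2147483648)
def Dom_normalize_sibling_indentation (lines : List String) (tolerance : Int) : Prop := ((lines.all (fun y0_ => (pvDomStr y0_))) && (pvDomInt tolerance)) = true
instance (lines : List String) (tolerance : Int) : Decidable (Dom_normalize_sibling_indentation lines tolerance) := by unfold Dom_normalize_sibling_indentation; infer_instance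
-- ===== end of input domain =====

-- B replaces A's nested index-jumping while-loops by one monotonic forward pass with a
-- three-state machine (objective: alternative decomposition, same O(total size) cost).
-- Mutation note: Python A builds and mutates a fresh copy (new_lines); the input list
-- itself is never mutated by either program, so return-value equivalence is the whole story.

-- ===== PORT A =====
-- count_leading_spaces: len(line) - len(line.lstrip(' ')); lstrip(' ') is ported by hand as
-- dropWhile (· == ' ') on the character list — exact: it removes exactly the leading spaces.
def countLeadingSpaces (line : String) : Int :=
  ((line.toList.length : Int) - ((line.toList.dropWhile (fun c => c == ' ')).length : Int))

-- line.strip() == ""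
def isBlankLine (l : String) : Bool := PySem.Chars.strip l.toList == []

-- line.rstrip().endswith(":") and not line.lstrip().startswith("def ")
def isHeaderLine (l : String) : Bool :=
  PySem.Chars.endswith (PySem.Chars.rstrip l.toList) [':']
    && !(PySem.Chars.startswith (PySem.Chars.lstrip l.toList) "def ".toList)

-- " " * marker + line.lstrip(' ')  (marker is a count of leading spaces, hence ≥ 0)
def reindentLine (marker : Int) (l : String) : String :=
  String.ofList (List.replicate marker.toNat ' ' ++ l.toList.dropWhile (fun c => c == ' '))

-- inner loop "while j < len and new_lines[j].strip() == '': j += 1"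
def findJA (xs : List String) (j : Nat) : Nat :=
  if h : j < xs.length then
    if isBlankLine xs[j] then findJA xs (j + 1) else j
  else j
termination_by xs.length - j

-- inner loop "while k < len(new_lines): …" (returns the mutated list and the final k)
def processKA (xs : List String) (parent marker tol : Int) (k : Nat) : List String × Nat :=
  if h : k < xs.length then
    if isBlankLine xs[k] then processKA xs parent marker tol (k + 1)
    else
      let cur := countLeadingSpaces xs[k]
      if cur ≤ parent then (xs, k)
      else
        let xs' := if |cur - marker| ≤ tol then xs.set k (reindentLine marker xs[k]) else xs
        processKA xs' parent marker tol (k + 1)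
  else (xs, k)
termination_by xs.length - k
decreasing_by
  all_goals (try split) <;> (try simp [List.length_set]) <;> omega

-- outer loop "while i < len(new_lines) - 1:".  The fuel only makes the recursion total:
-- i strictly increases each round, so fuel = length + 1 is never exhausted.  The 'else xs'
-- for j = length is where Python raises UnboundLocalError or loops forever (outside Pre_).
def loopA (tol : Int) (fuel : Nat) (xs : List String) (i : Nat) : List String :=
  match fuel with
  | 0 => xs
  | fuel + 1 =>
    if h : i + 1 < xs.length then
      if isHeaderLine xs[i] then
        let parent := countLeadingSpaces xs[i]
        let j := findJA xs (i + 1)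
        if hj : j < xs.length then
          let r := processKA xs parent (countLeadingSpaces xs[j]) tol (j + 1)
          loopA tol fuel r.1 r.2
        else xs
      else loopA tol fuel xs (i + 1)
    else xs

def normalize_sibling_indentation (lines : List String) (tolerance : Int) : List String :=
  loopA tolerance (lines.length + 1) lines 0

-- ===== PORT B =====
-- state of the single forward pass: None / ("seek", parent) / ("block", parent, marker)
inductive BState
  | start : BState
  | seek : Int → BState
  | block : Int → Int → BState
deriving DecidableEq

-- one iteration of Source B's for-loop body: next state and the emitted line
def bStep (n : Nat) (tol : Int) (st : BState) (idx : Nat) (l : String) : BState × String :=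
  let blank := isBlankLine l
  let st1 : BState :=
    match st with
    | .block p _ => if ¬blank ∧ countLeadingSpaces l ≤ p then .start else st
    | _ => st
  match st1 with
  | .start =>
      ((if idx + 1 < n ∧ isHeaderLine l then .seek (countLeadingSpaces l) else .start), l)
  | .seek p =>
      ((if ¬blank then .block p (countLeadingSpaces l) else .seek p), l)
  | .block p m =>
      (.block p m, if ¬blank ∧ |countLeadingSpaces l - m| ≤ tol then reindentLine m l else l)

-- the for-loop over enumerate(lines), emitting each processed line
def bLoop (n : Nat) (tol : Int) : BState → Nat → List String → List String
  | _, _, [] => []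
  | st, idx, l :: ls =>
    let r := bStep n tol st idx l
    r.2 :: bLoop n tol r.1 (idx + 1) ls

def normalize_sibling_indentation_alt (lines : List String) (tolerance : Int) : List String :=
  bLoop lines.length tolerance .start 0 lines

-- ===== PRECONDITION & SPEC =====
-- Pre_ excludes inputs in which some colon-header line (one A's header test accepts, before the
-- last line) is followed only by blank lines to the end: when A's scan reaches such a header it
-- raises UnboundLocalError (no block processed yet) or loops forever (stale k); the exclusion is
-- by the line pattern alone, so it also drops a few inputs where every such header is nested
-- inside an earlier block and A returns normally (see cites).
def Pre_normalize_sibling_indentation (lines : List String) (tolerance : Int) : Prop :=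
  ∀ i < lines.length, (i + 1 < lines.length ∧ isHeaderLine (lines.getD i "") = true) →
    ∃ j < lines.length, i < j ∧ isBlankLine (lines.getD j "") = false

instance (lines : List String) (tolerance : Int) : Decidable (Pre_normalize_sibling_indentation lines tolerance) := by
  unfold Pre_normalize_sibling_indentation; infer_instance

def pvWitness_normalize_sibling_indentation : List String × Int := (["if x:", "  a", "   b"], 2)

def Spec_normalize_sibling_indentation (lines : List String) (tolerance : Int) (out : List String) : Prop := out = normalize_sibling_indentation_alt lines tolerance
instance (lines : List String) (tolerance : Int) (out : List String) : Decidable (Spec_normalize_sibling_indentation lines tolerance out) := by unfold Spec_normalize_sibling_indentation; infer_instance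

-- ===== CLAIM (what is proved, stated in full; the proofs are below) =====
def Claim_equal_normalize_sibling_indentation : Prop := ∀ (lines : List String) (tolerance : Int), Dom_normalize_sibling_indentation lines tolerance → Pre_normalize_sibling_indentation lines tolerance → Spec_normalize_sibling_indentation lines tolerance (normalize_sibling_indentation lines tolerance)

-- ===== LEMMAS AND PROOFS =====

-- Pre_, restricted to positions ≥ i (all either loop ever reads)
def PreFrom (xs : List String) (i : Nat) : Prop :=
  ∀ t, i ≤ t → t + 1 < xs.length → isHeaderLine (xs.getD t "") = true →
    ∃ j < xs.length, t < j ∧ isBlankLine (xs.getD j "") = false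

theorem preFrom_mono {xs : List String} {i i' : Nat} (h : i ≤ i') (hp : PreFrom xs i) :
    PreFrom xs i' := fun t ht => hp t (le_trans h ht)

theorem findJA_spec (xs : List String) (j0 : Nat)
    (hex : ∃ t, j0 ≤ t ∧ t < xs.length ∧ isBlankLine (xs.getD t "") = false) :
    j0 ≤ findJA xs j0 ∧ findJA xs j0 < xs.length ∧
      isBlankLine (xs.getD (findJA xs j0) "") = false ∧
      ∀ t, j0 ≤ t → t < findJA xs j0 → isBlankLine (xs.getD t "") = true := by
  fun_induction findJA xs j0 with
  | case1 j h hb ih =>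
    obtain ⟨t, ht0, ht1, ht2⟩ := hex
    have htj : t ≠ j := by
      intro he; rw [he, List.getD_eq_getElem _ _ h] at ht2; simp [hb] at ht2
    obtain ⟨h1, h2, h3, h4⟩ := ih ⟨t, by omega, ht1, ht2⟩
    refine ⟨by omega, h2, h3, ?_⟩
    intro u hu0 hu1
    rcases Nat.eq_or_lt_of_le hu0 with he | hlt
    · rw [← he, List.getD_eq_getElem _ _ h]; exact hb
    · exact h4 u hlt hu1
  | case2 j h hb =>
    refine ⟨le_refl _, h, ?_, fun t ht0 ht1 => by omega⟩
    rw [List.getD_eq_getElem _ _ h]; simpa using hb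
  | case3 j h =>
    obtain ⟨t, ht0, ht1, _⟩ := hex
    omega

theorem processKA_spec (xs : List String) (p m tol : Int) (k : Nat) :
    k ≤ (processKA xs p m tol k).2 ∧
    (processKA xs p m tol k).1.length = xs.length ∧
    (processKA xs p m tol k).1.take k = xs.take k ∧
    (processKA xs p m tol k).1.drop (processKA xs p m tol k).2 =
      xs.drop (processKA xs p m tol k).2 := by
  fun_induction processKA xs p m tol k with
  | case1 xs k hlt hb ih =>
    obtain ⟨i1, i2, i3, i4⟩ := ih
    refine ⟨by omega, i2, ?_, i4⟩
    have := congrArg (List.take k) i3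
    simpa [List.take_take] using this
  | case2 xs k hlt hnb cur hle =>
    exact ⟨le_refl _, rfl, rfl, rfl⟩
  | case3 xs k hlt hnb cur hgt xs' ih =>
    obtain ⟨i1, i2, i3, i4⟩ := ih
    have hlen : xs'.length = xs.length := by
      simp only [xs']; split <;> simp
    have htk' : xs'.take k = xs.take k := by
      simp only [xs']; split
      · rw [List.take_set, List.set_eq_of_length_le (by simp)]
      · rfl
    have hdk : ∀ u, k + 1 ≤ u → xs'.drop u = xs.drop u := by
      intro u hu
      simp only [xs']; split
      · rw [List.drop_set, if_pos (by omega)]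
      · rfl
    refine ⟨by omega, by rw [i2, hlen], ?_, ?_⟩
    · have h5 : List.take k (processKA xs' p m tol (k + 1)).1 = List.take k xs' := by
        simpa [List.take_take] using congrArg (List.take k) i3
      rw [h5, htk']
    · rw [i4, hdk _ (by omega)]
  | case4 xs k hge =>
    exact ⟨le_refl _, rfl, rfl, rfl⟩

theorem bLoop_nil (n : Nat) (tol : Int) (st : BState) (idx : Nat) :
    bLoop n tol st idx [] = [] := rfl

theorem bLoop_cons (n : Nat) (tol : Int) (st : BState) (idx : Nat) (l : String) (ls : List String) :
    bLoop n tol st idx (l :: ls) =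
      (bStep n tol st idx l).2 :: bLoop n tol (bStep n tol st idx l).1 (idx + 1) ls := rfl

theorem bStep_start_header {n idx : Nat} {tol : Int} {l : String}
    (hn : idx + 1 < n) (hh : isHeaderLine l = true) :
    bStep n tol .start idx l = (.seek (countLeadingSpaces l), l) := by
  simp [bStep, hn, hh]

theorem bStep_start_not {n idx : Nat} {tol : Int} {l : String}
    (h : ¬(idx + 1 < n ∧ isHeaderLine l = true)) :
    bStep n tol .start idx l = (.start, l) := by
  simp [bStep]
  intro h1
  cases hh : isHeaderLine l with
  | false => rfl
  | true => exact absurd ⟨h1, hh⟩ h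

theorem bStep_seek_blank {n idx : Nat} {tol p : Int} {l : String}
    (hb : isBlankLine l = true) :
    bStep n tol (.seek p) idx l = (.seek p, l) := by
  simp [bStep, hb]

theorem bStep_seek_nonblank {n idx : Nat} {tol p : Int} {l : String}
    (hb : isBlankLine l = false) :
    bStep n tol (.seek p) idx l = (.block p (countLeadingSpaces l), l) := by
  simp [bStep, hb]

theorem bStep_block_blank {n idx : Nat} {tol p m : Int} {l : String}
    (hb : isBlankLine l = true) :
    bStep n tol (.block p m) idx l = (.block p m, l) := by
  simp [bStep, hb]

theorem bStep_block_exit {n idx : Nat} {tol p m : Int} {l : String}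
    (hb : isBlankLine l = false) (hle : countLeadingSpaces l ≤ p) :
    bStep n tol (.block p m) idx l = bStep n tol .start idx l := by
  simp [bStep, hb, hle]

theorem bStep_block_stay {n idx : Nat} {tol p m : Int} {l : String}
    (hb : isBlankLine l = false) (hgt : ¬countLeadingSpaces l ≤ p) :
    bStep n tol (.block p m) idx l =
      (.block p m, if |countLeadingSpaces l - m| ≤ tol then reindentLine m l else l) := by
  simp [bStep, hb, hgt]

theorem block_corr (xs : List String) (p m tol : Int) (k : Nat) :
    bLoop xs.length tol (.block p m) k (xs.drop k) =
      ((processKA xs p m tol k).1.drop k).take ((processKA xs p m tol k).2 - k) ++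
        bLoop xs.length tol .start (processKA xs p m tol k).2
          (xs.drop (processKA xs p m tol k).2) := by
  fun_induction processKA xs p m tol k with
  | case1 xs k hlt hb ih =>
    obtain ⟨s1, s2, s3, s4⟩ := processKA_spec xs p m tol (k + 1)
    rw [List.drop_eq_getElem_cons hlt, bLoop_cons, bStep_block_blank hb]
    simp only []
    rw [ih]
    have hk1 : k < (processKA xs p m tol (k + 1)).1.length := by rw [s2]; exact hlt
    have h9 : (processKA xs p m tol (k + 1)).1[k]? = xs[k]? := by
      have := congrArg (fun l => l[k]?) s3
      simpa [List.getElem?_take, Nat.lt_succ_self] using this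
    have hgk : (processKA xs p m tol (k + 1)).1[k] = xs[k] := by
      rw [List.getElem?_eq_getElem hk1, List.getElem?_eq_getElem hlt] at h9
      exact Option.some.inj h9
    rw [List.drop_eq_getElem_cons hk1, hgk]
    have hsub : (processKA xs p m tol (k + 1)).2 - k = ((processKA xs p m tol (k + 1)).2 - (k + 1)) + 1 := by omega
    rw [hsub, List.take_succ_cons]
    simp
  | case2 xs k hlt hnb cur hle =>
    have hb' : isBlankLine xs[k] = false := by simpa using hnb
    simp only [Nat.sub_self, List.take_zero, List.nil_append]
    rw [List.drop_eq_getElem_cons hlt, bLoop_cons, bLoop_cons, bStep_block_exit hb' hle]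
  | case3 xs k hlt hnb cur hgt xs' ih =>
    have hb' : isBlankLine xs[k] = false := by simpa using hnb
    obtain ⟨s1, s2, s3, s4⟩ := processKA_spec xs' p m tol (k + 1)
    have hlen : xs'.length = xs.length := by simp only [xs']; split <;> simp
    have hdu : ∀ u, k + 1 ≤ u → xs'.drop u = xs.drop u := by
      intro u hu
      simp only [xs']; split
      · rw [List.drop_set, if_pos (by omega)]
      · rfl
    have hd2 : xs'.drop (processKA xs' p m tol (k + 1)).2 = xs.drop (processKA xs' p m tol (k + 1)).2 :=
      hdu _ (by omega)
    have hd1 : xs'.drop (k + 1) = xs.drop (k + 1) := hdu _ le_rfl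
    have hxk : xs'[k]'(by omega) = (if |countLeadingSpaces xs[k] - m| ≤ tol then reindentLine m xs[k] else xs[k]) := by
      simp only [xs']; split
      · exact List.getElem_set_self _
      · rfl
    rw [List.drop_eq_getElem_cons hlt, bLoop_cons, bStep_block_stay hb' hgt]
    simp only []
    rw [← hd1, ← hlen, ih, hd2]
    have hk1 : k < (processKA xs' p m tol (k + 1)).1.length := by rw [s2]; omega
    have h9 : (processKA xs' p m tol (k + 1)).1[k]? = xs'[k]? := by
      have := congrArg (fun l => l[k]?) s3
      simpa [List.getElem?_take, Nat.lt_succ_self] using this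
    have hgk : (processKA xs' p m tol (k + 1)).1[k] = xs'[k]'(by omega) := by
      rw [List.getElem?_eq_getElem hk1, List.getElem?_eq_getElem (by omega : k < xs'.length)] at h9
      exact Option.some.inj h9
    rw [List.drop_eq_getElem_cons hk1, hgk, hxk]
    have hsub : (processKA xs' p m tol (k + 1)).2 - k = ((processKA xs' p m tol (k + 1)).2 - (k + 1)) + 1 := by omega
    rw [hsub, List.take_succ_cons]
    simp [hlen]
  | case4 xs k hge =>
    have : xs.drop k = [] := List.drop_eq_nil_of_le (by omega)
    simp [this, bLoop_nil]

theorem seek_corr (xs : List String) (tol p : Int) (idx j : Nat)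
    (hij : idx ≤ j) (hj : j < xs.length)
    (hblank : ∀ t, idx ≤ t → t < j → isBlankLine (xs.getD t "") = true)
    (hnb : isBlankLine (xs.getD j "") = false) :
    bLoop xs.length tol (.seek p) idx (xs.drop idx) =
      (xs.drop idx).take (j - idx) ++ xs.getD j "" ::
        bLoop xs.length tol (.block p (countLeadingSpaces (xs.getD j ""))) (j + 1)
          (xs.drop (j + 1)) := by
  induction hd : j - idx generalizing idx with
  | zero =>
    have he : idx = j := by omega
    subst he
    rw [List.drop_eq_getElem_cons hj, bLoop_cons,
      bStep_seek_nonblank (by rwa [List.getD_eq_getElem _ _ hj] at hnb)]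
    rw [List.getD_eq_getElem _ _ hj]
    simp
  | succ d ihd =>
    have hij' : idx < j := by omega
    have hidx : idx < xs.length := by omega
    have hbl : isBlankLine xs[idx] = true := by
      have := hblank idx le_rfl hij'
      rwa [List.getD_eq_getElem _ _ hidx] at this
    rw [List.drop_eq_getElem_cons hidx, bLoop_cons, bStep_seek_blank hbl]
    have ih := ihd (idx + 1) (by omega) (fun t ht0 ht1 => hblank t (by omega) ht1) (by omega)
    rw [ih]
    rw [List.take_succ_cons]
    simp

theorem mainA (N : Nat) (xs : List String) (tol : Int) (i fuel : Nat)
    (hN : xs.length - i ≤ N) (hfuel : xs.length < fuel + i) (hpre : PreFrom xs i) :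
    loopA tol fuel xs i = xs.take i ++ bLoop xs.length tol .start i (xs.drop i) := by
  induction N generalizing xs i fuel with
  | zero =>
    have hil : xs.length ≤ i := by omega
    have hdrop : xs.drop i = [] := List.drop_eq_nil_of_le hil
    have htake : xs.take i = xs := List.take_of_length_le hil
    cases fuel with
    | zero => simp [loopA, hdrop, htake, bLoop_nil]
    | succ f =>
      rw [loopA, dif_neg (by omega)]
      simp [hdrop, htake, bLoop_nil]
  | succ N ihN =>
    cases fuel with
    | zero =>
      have hil : xs.length ≤ i := by omega
      simp [loopA, List.drop_eq_nil_of_le hil, List.take_of_length_le hil, bLoop_nil]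
    | succ f =>
      by_cases h : i + 1 < xs.length
      · have hi : i < xs.length := by omega
        by_cases hh : isHeaderLine xs[i] = true
        · -- header case
          rw [loopA, dif_pos h, if_pos hh]
          have hex : ∃ t, i + 1 ≤ t ∧ t < xs.length ∧ isBlankLine (xs.getD t "") = false := by
            obtain ⟨t2, ht2a, ht2b, ht2c⟩ := hpre i le_rfl h (by rwa [List.getD_eq_getElem _ _ hi])
            exact ⟨t2, by omega, ht2a, ht2c⟩
          obtain ⟨f1, f2, f3, f4⟩ := findJA_spec xs (i + 1) hex
          rw [dif_pos f2]
          obtain ⟨s1, s2, s3, s4⟩ :=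
            processKA_spec xs (countLeadingSpaces xs[i]) (countLeadingSpaces xs[findJA xs (i + 1)]) tol (findJA xs (i + 1) + 1)
          set j := findJA xs (i + 1) with hjdef
          set r := processKA xs (countLeadingSpaces xs[i]) (countLeadingSpaces xs[j]) tol (j + 1) with hrdef
          have hih := ihN r.1 r.2 f (by omega) (by omega) ?_
          · rw [hih]
            -- right-hand side: unfold the b-side through the header, seek and block phases
            conv_rhs => rw [List.drop_eq_getElem_cons hi, bLoop_cons,
              bStep_start_header h hh]
            have hsk := seek_corr xs tol (countLeadingSpaces xs[i]) (i + 1) j (by omega) f2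
              (fun t ht0 ht1 => f4 t ht0 ht1) f3
            rw [List.getD_eq_getElem _ _ f2] at hsk
            conv_rhs => rw [hsk]
            have hbc := block_corr xs (countLeadingSpaces xs[i]) (countLeadingSpaces xs[j]) tol (j + 1)
            rw [← hrdef] at hbc
            conv_rhs => rw [hbc]
            rw [s2, s4]
            -- both sides are now  r.1.take r.2 ++ tail  vs  segments of xs ++ same tail
            have hseg1 : r.1.take r.2 = xs.take (j + 1) ++ (r.1.drop (j + 1)).take (r.2 - (j + 1)) := by
              have : r.2 = (j + 1) + (r.2 - (j + 1)) := by omega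
              rw [this, List.take_add]
              congr 1
              · have := congrArg (List.take (j + 1)) s3
                simpa [List.take_take, this] using s3
            have hseg2 : xs.take (j + 1) =
                ((xs.take i ++ [xs[i]]) ++ (xs.drop (i + 1)).take (j - (i + 1))) ++ [xs[j]] := by
              have e1 : xs.take (j + 1) = xs.take j ++ [xs[j]] := (List.take_append_getElem f2).symm
              have e2 : xs.take j = xs.take (i + 1) ++ (xs.drop (i + 1)).take (j - (i + 1)) := by
                have hje : j = (i + 1) + (j - (i + 1)) := by omega
                conv_lhs => rw [hje]
                rw [List.take_add]
              have e3 : xs.take (i + 1) = xs.take i ++ [xs[i]] := (List.take_append_getElem hi).symm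
              rw [e1, e2, e3]
            rw [hseg1, hseg2]
            simp only [List.append_assoc, List.cons_append, List.nil_append]
          · -- PreFrom transfers to the modified list past r.2
            intro t ht0 ht1 hht
            have hget : ∀ u, r.2 ≤ u → r.1.getD u "" = xs.getD u "" := by
              intro u hu
              rw [List.getD_eq_getElem?_getD, List.getD_eq_getElem?_getD]
              have h1 : u = r.2 + (u - r.2) := by omega
              rw [h1, ← List.getElem?_drop, ← List.getElem?_drop, s4]
            rw [s2] at ht1
            obtain ⟨j2, hj2a, hj2b, hj2c⟩ :=
              preFrom_mono (show i ≤ t by omega) hpre t le_rfl ht1 (by rwa [hget t ht0] at hht)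
            refine ⟨j2, by rw [s2]; exact hj2a, hj2b, ?_⟩
            rw [hget j2 (by omega)]
            exact hj2c
        · -- not a header: plain step
          rw [loopA, dif_pos h, if_neg hh]
          have hih := ihN xs (i + 1) f (by omega) (by omega) (preFrom_mono (by omega) hpre)
          rw [hih]
          conv_rhs => rw [List.drop_eq_getElem_cons hi, bLoop_cons,
            bStep_start_not (by rintro ⟨-, hc⟩; exact hh hc)]
          simp only []
          rw [← List.take_append_getElem hi, List.append_assoc, List.singleton_append]
      · -- i is the last line (or past the end): both sides copy the rest unchanged
        rw [loopA, dif_neg h]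
        rcases Nat.lt_or_ge i xs.length with hi | hi
        · have hi1 : xs.length = i + 1 := by omega
          rw [List.drop_eq_getElem_cons hi, bLoop_cons,
            bStep_start_not (by rintro ⟨hc, -⟩; omega)]
          simp only []
          have hnil : xs.drop (i + 1) = [] := List.drop_eq_nil_of_le (by omega)
          rw [hnil, bLoop_nil, List.take_append_getElem hi,
            List.take_of_length_le (by omega)]
        · simp [List.drop_eq_nil_of_le hi, List.take_of_length_le hi, bLoop_nil]

-- ===== VERDICT (by name: the statement is the Claim_ definition above) =====
theorem normalize_sibling_indentation_spec : Claim_equal_normalize_sibling_indentation := by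
  intro lines tol _ hpre
  unfold Spec_normalize_sibling_indentation
  unfold normalize_sibling_indentation normalize_sibling_indentation_alt
  have h := mainA lines.length lines tol 0 (lines.length + 1) (by omega) (by omega)
    (by intro t _ ht hh; exact hpre t (by omega) ⟨ht, hh⟩)
  simpa using h
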